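-- pv_equiv track=rewrite | github.com/NoahKamara/Python-Course | projects/lesson_03_02.py | findInText
-- ===== SOURCE A (Python) =====
-- def findInText(text, wordList):
--     casefoldText = text.casefold()
--     splitText = casefoldText.split(" ")
--     for word in splitText:
--         for searchTerm in wordList:
--             if word == searchTerm:
--                 return True
--     return False
-- ===== SOURCE B (Python) =====
-- def findInText(text, wordList):
--     terms = set(wordList)
--     cur = []
--     for ch in text.casefold():
--         if ch == ' ':
--             if ''.join(cur) in terms:
--                 return True
--             cur = []
--         else:
--             cur.append(ch)
--     return ''.join(cur) in terms
-- ===== Notes on version B (the rewrite author's own statement) =====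
-- stated objective: alternative
-- what changed: Replaced split-into-words plus nested word/term loops by a single character-level scan that accumulates the current word and tests it against a prebuilt set at each space boundary, returning early on a hit.
import Mathlib
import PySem

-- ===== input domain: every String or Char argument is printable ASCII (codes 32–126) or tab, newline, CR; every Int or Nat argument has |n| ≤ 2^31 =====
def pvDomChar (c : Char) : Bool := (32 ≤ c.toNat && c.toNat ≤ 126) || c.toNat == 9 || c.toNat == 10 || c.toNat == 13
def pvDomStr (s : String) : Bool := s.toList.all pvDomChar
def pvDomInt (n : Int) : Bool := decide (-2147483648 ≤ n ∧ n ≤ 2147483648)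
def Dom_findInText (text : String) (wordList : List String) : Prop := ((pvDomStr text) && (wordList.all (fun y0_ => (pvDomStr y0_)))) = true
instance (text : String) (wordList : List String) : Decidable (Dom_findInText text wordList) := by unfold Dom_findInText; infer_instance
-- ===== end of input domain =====

-- B replaces A's split-then-nested-loops search by a single character-level scan with a word accumulator and a set of terms (objective: alternative).


-- ===== PORT A =====
-- casefold on the ASCII domain = lower (exact there)
def findInText (text : String) (wordList : List String) : Bool :=
  let casefoldText := PySem.Str.lower text
  let splitText := (PySem.Str.split? casefoldText " ").getD []
  splitText.any (fun word => wordList.any (fun searchTerm => word == searchTerm))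

-- ===== PORT B =====
-- single left-to-right scan over the characters; state = (found-so-far, current word);
-- the Python early 'return True' is the found flag that stays true
def findInText_alt (text : String) (wordList : List String) : Bool :=
  let terms := PySem.Set.ofList wordList
  let st := (PySem.Str.lower text).toList.foldl
    (fun (st : Bool × List Char) ch =>
      if ch == ' ' then (st.1 || PySem.Set.contains terms (String.ofList st.2), [])
      else (st.1, st.2 ++ [ch]))
    (false, [])
  st.1 || PySem.Set.contains terms (String.ofList st.2)

-- ===== PRECONDITION & SPEC =====
def Spec_findInText (text : String) (wordList : List String) (out : Bool) : Prop := out = findInText_alt text wordList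
instance (text : String) (wordList : List String) (out : Bool) : Decidable (Spec_findInText text wordList out) := by unfold Spec_findInText; infer_instance

-- ===== CLAIM (what is proved, stated in full; the proofs are below) =====
def Claim_equal_findInText : Prop := ∀ (text : String) (wordList : List String), Dom_findInText text wordList → Spec_findInText text wordList (findInText text wordList)

-- ===== LEMMAS AND PROOFS =====

-- reference shape of split-on-one-space with a pending (already read) prefix `cur` of the current word
def myWords : List Char → List Char → List (List Char)
  | [], cur => [cur]
  | c :: rest, cur => if c == ' ' then cur :: myWords rest [] else myWords rest (cur ++ [c])

theorem splitOn_go_eq (l : List Char) : ∀ (fuel : Nat) (cur : List Char) (acc : List (List Char)),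
    l.length ≤ fuel →
    PySem.Chars.splitOn.go [' '] fuel l cur acc = acc.reverse ++ myWords l cur.reverse := by
  induction l with
  | nil =>
    intro fuel cur acc _
    cases fuel <;> simp [PySem.Chars.splitOn.go, myWords]
  | cons c rest ih =>
    intro fuel cur acc hf
    cases fuel with
    | zero => simp at hf
    | succ f =>
      by_cases hc : c = ' '
      · subst hc
        rw [show PySem.Chars.splitOn.go [' '] (f+1) (' ' :: rest) cur acc
              = PySem.Chars.splitOn.go [' '] f rest [] (cur.reverse :: acc) by
            simp [PySem.Chars.splitOn.go, List.isPrefixOf]]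
        rw [ih f [] (cur.reverse :: acc) (by simpa using Nat.lt_succ_iff.mp (by simpa using hf))]
        simp [myWords]
      · rw [show PySem.Chars.splitOn.go [' '] (f+1) (c :: rest) cur acc
              = PySem.Chars.splitOn.go [' '] f rest (c :: cur) acc by
            simp [PySem.Chars.splitOn.go, List.isPrefixOf]
            intro h; exact absurd h.symm hc]
        rw [ih f (c :: cur) acc (by simpa using Nat.lt_succ_iff.mp (by simpa using hf))]
        simp [myWords, hc]

theorem splitOn_space_eq (l : List Char) : PySem.Chars.splitOn l [' '] = myWords l [] := by
  have := splitOn_go_eq l (l.length + 1) [] [] (by omega)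
  simpa [PySem.Chars.splitOn] using this

-- the scan of B computes 'found so far OR some remaining word is a term'
theorem scan_eq_any (terms : PySem.Set String) (l : List Char) :
    ∀ (found : Bool) (cur : List Char),
    ((l.foldl
        (fun (st : Bool × List Char) ch =>
          if ch == ' ' then (st.1 || PySem.Set.contains terms (String.ofList st.2), [])
          else (st.1, st.2 ++ [ch]))
        (found, cur)).1
      || PySem.Set.contains terms (String.ofList (l.foldl
        (fun (st : Bool × List Char) ch =>
          if ch == ' ' then (st.1 || PySem.Set.contains terms (String.ofList st.2), [])
          else (st.1, st.2 ++ [ch]))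
        (found, cur)).2))
      = (found || (myWords l cur).any (fun w => PySem.Set.contains terms (String.ofList w))) := by
  induction l with
  | nil => intro found cur; simp [myWords]
  | cons c rest ih =>
    intro found cur
    by_cases hc : c = ' '
    · subst hc
      simp only [List.foldl_cons, if_pos (by simp : ((' ' : Char) == ' ') = true)]
      rw [ih]
      simp [myWords, Bool.or_assoc]
    · simp only [List.foldl_cons]
      rw [if_neg (by simpa using hc)]
      rw [ih]
      simp [myWords, hc]

theorem mem_any_eq (wordList : List String) (w : String) :
    wordList.any (fun searchTerm => w == searchTerm)
      = PySem.Set.contains (PySem.Set.ofList wordList) w := by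
  rw [Bool.eq_iff_iff]
  simp [List.any_eq_true, PySem.Set.mem_ofList]

-- ===== VERDICT (by name: the statement is the Claim_ definition above) =====
theorem findInText_spec : Claim_equal_findInText := by
  intro text wordList _
  have hsplit : (PySem.Str.split? (PySem.Str.lower text) " ").getD []
      = (PySem.Chars.splitOn (PySem.Str.lower text).toList [' ']).map String.ofList := by
    simp [PySem.Str.split?, PySem.Chars.split?, show (" " : String).toList = [' '] from rfl]
  unfold Spec_findInText findInText findInText_alt
  simp only [hsplit, splitOn_space_eq, scan_eq_any, List.any_map, Bool.false_or]
  exact List.any_congr rfl (fun w => mem_any_eq wordList (String.ofList w))
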